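-- pv_equiv track=rewrite | github.com/FedorF/leetcode | Problems/Other/Drone Flight Planner/solution.py | calc_min_energy
-- ===== SOURCE A (Python) =====
-- from typing import List
--
-- def calc_min_energy(route: List[List[int]]) -> float:
--     """
--     Since drone doesn't spend energy on flat movement, we are only interested in z coordinate.
--
--     Time complexity: O(n)
--     Space complexity: O(1)
--     """
--     battery = energy_needed = 0
--     for i in range(1, len(route)):
--         high = route[i][2] - route[i - 1][2]  # calculate step i high
--         if high <= 0:  # descending, so battery charging
--             battery += -high
--         else:  # ascending, so spending battery's energy
--             battery -= high
--             if battery < 0: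
--                 energy_needed += -battery
--                 battery = 0
--     return energy_needed
-- ===== SOURCE B (Python) =====
-- from typing import List
--
-- def calc_min_energy(route: List[List[int]]) -> int:
--     # Closed form: energy needed equals the highest climb above the start altitude.
--     if not route:
--         return 0
--     z0 = route[0][2]
--     peak = max(p[2] for p in route)
--     return max(0, peak - z0)
-- ===== Notes on version B (the rewrite author's own statement) =====
-- stated objective: simpler
-- what changed: Replaces the iterative clamped-battery simulation with the closed form max(0, peak z - starting z), since the required extra energy is exactly the highest climb above the start altitude.
-- outside the precondition, e.g. on calc_min_energy([[1, 2]]): A returns 0, B raises IndexError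
import Mathlib
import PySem

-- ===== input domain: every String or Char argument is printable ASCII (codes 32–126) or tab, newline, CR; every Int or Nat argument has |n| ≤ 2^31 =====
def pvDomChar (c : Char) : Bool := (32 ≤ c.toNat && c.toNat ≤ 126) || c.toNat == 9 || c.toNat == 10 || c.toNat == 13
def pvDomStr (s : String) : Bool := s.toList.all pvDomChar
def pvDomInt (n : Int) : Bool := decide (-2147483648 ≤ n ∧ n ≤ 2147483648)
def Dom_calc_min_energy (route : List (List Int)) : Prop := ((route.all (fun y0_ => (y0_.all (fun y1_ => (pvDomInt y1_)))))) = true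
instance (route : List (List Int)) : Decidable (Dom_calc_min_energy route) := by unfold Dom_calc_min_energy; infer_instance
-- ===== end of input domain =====

-- B replaces A's iterative clamped-battery simulation by the closed form
-- max(0, peak altitude - starting altitude); objective: simpler.

-- ===== PORT A =====
-- loop body of A's for-loop (state = (battery, energy_needed))
def pvBodyA (route : List (List Int)) (s : Int × Int) (i : Int) : Int × Int :=
  let high := (PySem.List.pyGet? ((PySem.List.pyGet? route i).getD []) 2).getD 0
              - (PySem.List.pyGet? ((PySem.List.pyGet? route (i - 1)).getD []) 2).getD 0
  if high ≤ 0 then (s.1 + (-high), s.2)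
  else
    let battery := s.1 - high
    if battery < 0 then (0, s.2 + (-battery)) else (battery, s.2)

def calc_min_energy (route : List (List Int)) : Int :=
  ((PySem.List.pyRange 1 (route.length : Int) 1).foldl (pvBodyA route) (0, 0)).2

-- ===== PORT B =====
def calc_min_energy_alt (route : List (List Int)) : Int :=
  match route with
  | [] => 0
  | p :: rest =>
    let z2 := fun (q : List Int) => (PySem.List.pyGet? q 2).getD 0
    let z0 := z2 p
    let peak := (rest.map z2).foldl max (z2 p)
    max 0 (peak - z0)

-- ===== PRECONDITION & SPEC =====
-- Pre_ excludes routes containing a point with fewer than 3 coordinates: Python A raises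
-- IndexError on them whenever the route has ≥ 2 points, and Python B raises on any such route.
def Pre_calc_min_energy (route : List (List Int)) : Prop :=
  ∀ p ∈ route, 3 ≤ p.length
instance (route : List (List Int)) : Decidable (Pre_calc_min_energy route) := by
  unfold Pre_calc_min_energy; infer_instance
def pvWitness_calc_min_energy : List (List Int) := [[0, 0, 5], [0, 0, 2]]

def Spec_calc_min_energy (route : List (List Int)) (out : Int) : Prop := out = calc_min_energy_alt route
instance (route : List (List Int)) (out : Int) : Decidable (Spec_calc_min_energy route out) := by unfold Spec_calc_min_energy; infer_instance

-- ===== CLAIM (what is proved, stated in full; the proofs are below) =====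
def Claim_equal_calc_min_energy : Prop := ∀ (route : List (List Int)), Dom_calc_min_energy route → Pre_calc_min_energy route → Spec_calc_min_energy route (calc_min_energy route)

-- ===== LEMMAS AND PROOFS =====

-- the z-coordinate of a point, with Python's default semantics folded away
def pvZ (p : List Int) : Int := (PySem.List.pyGet? p 2).getD 0

-- A's loop rephrased as structural recursion over the z-values, threading the previous z
def pvGo (prev : Int) (s : Int × Int) : List Int → Int × Int
  | [] => s
  | z :: zs =>
      pvGo z
        (if z - prev ≤ 0 then (s.1 + (-(z - prev)), s.2)
         else if s.1 - (z - prev) < 0 then (0, s.2 + (-(s.1 - (z - prev))))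
         else (s.1 - (z - prev), s.2)) zs

lemma pv_foldl_max_init : ∀ (zs : List Int) (a c : Int),
    zs.foldl max (max a c) = max a (zs.foldl max c) := by
  intro zs
  induction zs with
  | nil => intro a c; rfl
  | cons z zs ih =>
      intro a c
      simp only [List.foldl_cons]
      rw [max_assoc, ih]

lemma pvBodyA_eq (route : List (List Int)) (k : Nat) (hk : k + 1 < route.length) (s : Int × Int) :
    pvBodyA route s ((k : Int) + 1)
      = (if pvZ (route.getD (k+1) []) - pvZ (route.getD k []) ≤ 0 then
           (s.1 + (-(pvZ (route.getD (k+1) []) - pvZ (route.getD k []))), s.2)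
         else if s.1 - (pvZ (route.getD (k+1) []) - pvZ (route.getD k [])) < 0 then
           (0, s.2 + (-(s.1 - (pvZ (route.getD (k+1) []) - pvZ (route.getD k [])))))
         else (s.1 - (pvZ (route.getD (k+1) []) - pvZ (route.getD k [])), s.2)) := by
  have h1 : ((k : Int) + 1) = ((k + 1 : Nat) : Int) := by push_cast; ring
  have h2 : ((k + 1 : Nat) : Int) - 1 = ((k : Nat) : Int) := by push_cast; ring
  have g1 : PySem.List.pyGet? route ((k + 1 : Nat) : Int) = some (route.getD (k+1) []) := by
    rw [PySem.List.pyGet?_natCast, List.getElem?_eq_getElem hk, List.getD_eq_getElem _ _ hk]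
  have g2 : PySem.List.pyGet? route ((k : Nat) : Int) = some (route.getD k []) := by
    have hk' : k < route.length := by omega
    rw [PySem.List.pyGet?_natCast, List.getElem?_eq_getElem hk', List.getD_eq_getElem _ _ hk']
  simp only [pvBodyA, h1, h2, g1, g2, Option.getD_some, pvZ]

lemma pvBridge (route : List (List Int)) :
    ∀ (d : Nat), ∀ (k : Nat) (s : Int × Int), route.length - k = d + 1 → k < route.length →
      (PySem.List.pyRange ((k : Int) + 1) (route.length : Int) 1).foldl (pvBodyA route) s
        = pvGo (pvZ (route.getD k [])) s ((route.drop (k+1)).map pvZ) := by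
  intro d
  induction d with
  | zero =>
      intro k s hd hk
      have hk1 : k + 1 = route.length := by omega
      have hnil : PySem.List.pyRange ((k : Int) + 1) (route.length : Int) 1 = [] := by
        apply PySem.List.pyRange_one_eq_nil; omega
      rw [hnil, hk1, List.drop_length]
      rfl
  | succ d ih =>
      intro k s hd hk
      have hk1 : k + 1 < route.length := by omega
      have hcons : PySem.List.pyRange ((k : Int) + 1) (route.length : Int) 1
          = ((k : Int) + 1) :: PySem.List.pyRange (((k : Int) + 1) + 1) (route.length : Int) 1 := by
        apply PySem.List.pyRange_one_cons; omega
      rw [hcons, List.foldl_cons, pvBodyA_eq route k hk1 s]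
      have hcast : (((k : Int) + 1) + 1) = (((k + 1 : Nat) : Int) + 1) := by push_cast; ring
      rw [hcast, ih (k+1) _ (by omega) hk1]
      have hdrop : route.drop (k+1) = route.getD (k+1) [] :: route.drop (k+2) := by
        rw [List.getD_eq_getElem _ _ hk1]
        exact (List.getElem_cons_drop hk1).symm
      rw [hdrop, List.map_cons]
      rfl

lemma pvGo_snd : ∀ (zs : List Int) (prev b e : Int), 0 ≤ b →
    (pvGo prev (b, e) zs).2 = max e (zs.foldl max prev + e - b - prev) := by
  intro zs
  induction zs with
  | nil => intro prev b e hb; simp only [pvGo, List.foldl_nil]; omega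
  | cons z zs ih =>
      intro prev b e hb
      have hM := (PySem.List.le_foldl_max zs z).1
      have hfold : (z :: zs).foldl max prev = max prev (zs.foldl max z) := by
        simp only [List.foldl_cons]; exact pv_foldl_max_init zs prev z
      rw [hfold]
      simp only [pvGo]
      split_ifs with h1 h2
      · rw [ih z (b + -(z - prev)) e (by omega)]; omega
      · rw [ih z 0 (e + -(b - (z - prev))) (by omega)]; omega
      · rw [ih z (b - (z - prev)) e (by omega)]; omega

-- ===== VERDICT (by name: the statement is the Claim_ definition above) =====
theorem calc_min_energy_spec : Claim_equal_calc_min_energy := by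
  intro route _ _
  unfold Spec_calc_min_energy
  cases route with
  | nil => decide
  | cons p rest =>
      unfold calc_min_energy calc_min_energy_alt
      have h0 : ((0 : Nat) : Int) + 1 = (1 : Int) := by norm_num
      have hb := pvBridge (p :: rest) rest.length 0 (0, 0) (by simp) (by simp)
      rw [h0] at hb
      rw [show (p :: rest).getD 0 [] = p from rfl,
         show List.drop (0 + 1) (p :: rest) = rest from rfl] at hb
      rw [hb, pvGo_snd (rest.map pvZ) (pvZ p) 0 0 le_rfl]
      have hmap : rest.map pvZ = rest.map (fun q => (PySem.List.pyGet? q 2).getD 0) := rfl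
      rw [hmap]
      simp only [pvZ]
      omega
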